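-- pv_equiv track=rewrite | github.com/nishantgaurav23/crisis-bench | src/agents/situation_sense.py | _extract_highest_imd_color
-- ===== SOURCE A (Python) =====
-- def _extract_highest_imd_color(imd_data: list[dict]) -> str:
--     """Extract the highest IMD warning color code from a list of warnings."""
--     priority = {"red": 4, "orange": 3, "yellow": 2, "green": 1}
--     highest = ""
--     highest_score = 0
--     for item in imd_data:
--         color = item.get("color_code", "").lower().strip()
--         score = priority.get(color, 0)
--         if score > highest_score:
--             highest = color
--             highest_score = score
--     return highest
-- ===== SOURCE B (Python) =====
-- def _extract_highest_imd_color(imd_data: list[dict]) -> str: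
--     """Extract the highest IMD warning color code from a list of warnings."""
--     priority = {"red": 4, "orange": 3, "yellow": 2, "green": 1}
--     candidates = [c for c in (item.get("color_code", "").lower().strip() for item in imd_data)
--                   if c in priority]
--     if not candidates:
--         return ""
--     return sorted(candidates, key=priority.get)[-1]
-- ===== Notes on version B (the rewrite author's own statement) =====
-- stated objective: alternative
-- what changed: A's single-pass running argmax (state highest/highest_score) is replaced by building the list of normalized colors that are valid priority keys, returning '' if it is empty and otherwise the last element of that list stably sorted by priority.
import Mathlib
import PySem

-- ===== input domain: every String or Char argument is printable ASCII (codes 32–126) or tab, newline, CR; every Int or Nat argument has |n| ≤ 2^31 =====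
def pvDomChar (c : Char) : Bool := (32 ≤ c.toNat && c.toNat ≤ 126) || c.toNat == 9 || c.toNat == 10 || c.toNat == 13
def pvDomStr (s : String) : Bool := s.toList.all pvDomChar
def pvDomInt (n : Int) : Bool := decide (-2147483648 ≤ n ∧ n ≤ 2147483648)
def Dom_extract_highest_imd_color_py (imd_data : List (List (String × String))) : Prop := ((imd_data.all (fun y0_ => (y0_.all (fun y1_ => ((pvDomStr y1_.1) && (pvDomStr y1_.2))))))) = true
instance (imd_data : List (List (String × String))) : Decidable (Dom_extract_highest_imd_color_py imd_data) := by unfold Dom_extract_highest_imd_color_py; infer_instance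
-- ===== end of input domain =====

-- B replaces A's running argmax with filter-then-stable-sort-take-last (objective: alternative, not faster).

-- ===== PORT A =====
-- priority = {"red": 4, "orange": 3, "yellow": 2, "green": 1}
def pvPriority : PySem.Dict String Int :=
  PySem.Dict.mk [("red", 4), ("orange", 3), ("yellow", 2), ("green", 1)]

-- color = item.get("color_code", "").lower().strip()
def pvNormColor (item : List (String × String)) : String :=
  PySem.Str.strip (PySem.Str.lower (PySem.Dict.getD (PySem.Dict.mk item) "color_code" ""))

def extract_highest_imd_color_py (imd_data : List (List (String × String))) : String :=
  let st := imd_data.foldl (fun (st : String × Int) item =>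
      let color := pvNormColor item
      let score := pvPriority.getD color 0
      if score > st.2 then (color, score) else st) ("", 0)
  st.1

-- ===== PORT B =====
def extract_highest_imd_color_py_alt (imd_data : List (List (String × String))) : String :=
  let candidates := (imd_data.map pvNormColor).filter (fun c => pvPriority.contains c)
  if candidates = [] then ""
  else
    -- key=priority.get: on candidates the lookup always succeeds, ported as getD _ 0
    PySem.List.pyGetD (PySem.List.sorted candidates (fun c => pvPriority.getD c 0) false) (-1) ""

-- ===== PRECONDITION & SPEC =====
def Spec_extract_highest_imd_color_py (imd_data : List (List (String × String))) (out : String) : Prop := out = extract_highest_imd_color_py_alt imd_data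
instance (imd_data : List (List (String × String))) (out : String) : Decidable (Spec_extract_highest_imd_color_py imd_data out) := by unfold Spec_extract_highest_imd_color_py; infer_instance

-- ===== CLAIM (what is proved, stated in full; the proofs are below) =====
def Claim_equal_extract_highest_imd_color_py : Prop := ∀ (imd_data : List (List (String × String))), Dom_extract_highest_imd_color_py imd_data → Spec_extract_highest_imd_color_py imd_data (extract_highest_imd_color_py imd_data)

-- ===== LEMMAS AND PROOFS =====

-- score of a color; the name of each positive score
def pvScore (c : String) : Int := pvPriority.getD c 0
def pvName (s : Int) : String :=
  if s = 4 then "red" else if s = 3 then "orange" else if s = 2 then "yellow"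
  else if s = 1 then "green" else ""

lemma pvScore_pos_name (c : String) (h : 0 < pvScore c) : c = pvName (pvScore c) := by
  unfold pvScore pvPriority PySem.Dict.getD at *
  simp only [PySem.Dict.get?_mk_cons] at *
  split_ifs at * with h1 h2 h3 h4
  · rw [← (beq_iff_eq ..).mp h1]; rfl
  · rw [← (beq_iff_eq ..).mp h2]; rfl
  · rw [← (beq_iff_eq ..).mp h3]; rfl
  · rw [← (beq_iff_eq ..).mp h4]; rfl
  · simp [PySem.Dict.get?] at h

lemma pvContains_iff (c : String) : pvPriority.contains c = true ↔ 0 < pvScore c := by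
  unfold pvScore pvPriority PySem.Dict.contains PySem.Dict.getD
  simp only [PySem.Dict.get?_mk_cons]
  split_ifs with h1 h2 h3 h4
  · simp [h1]
  · simp [h2]
  · simp [h3]
  · simp [h4]
  · simp [h1, h2, h3, h4, PySem.Dict.get?]

lemma pvScore_nonneg (c : String) : 0 ≤ pvScore c := by
  unfold pvScore pvPriority PySem.Dict.getD
  simp only [PySem.Dict.get?_mk_cons]
  split_ifs <;> simp [PySem.Dict.get?]

-- A's fold, rephrased over the normalized colors
def pvMaxScore (cs : List String) (s : Int) : Int :=
  cs.foldl (fun m c => max m (pvScore c)) s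

lemma pvFoldA (cs : List String) (s : Int) (hs : 0 ≤ s) :
    cs.foldl (fun (st : String × Int) c =>
        if pvScore c > st.2 then (c, pvScore c) else st) (pvName s, s)
      = (pvName (pvMaxScore cs s), pvMaxScore cs s) := by
  induction cs generalizing s with
  | nil => simp [pvMaxScore]
  | cons c cs ih =>
    simp only [List.foldl_cons, pvMaxScore]
    by_cases h : pvScore c > s
    · have hc : c = pvName (pvScore c) := pvScore_pos_name c (by omega)
      rw [if_pos h]
      have : max s (pvScore c) = pvScore c := by omega
      rw [show ((c, pvScore c) : String × Int) = (pvName (pvScore c), pvScore c) by rw [← hc]]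
      simpa [pvMaxScore, this] using ih (pvScore c) (by omega)
    · rw [if_neg h]
      have : max s (pvScore c) = s := by have := pvScore_nonneg c; omega
      simpa [pvMaxScore, this] using ih s hs

lemma pvMaxScore_le (cs : List String) (s b : Int) (hs : s ≤ b)
    (h : ∀ c ∈ cs, pvScore c ≤ b) : pvMaxScore cs s ≤ b := by
  induction cs generalizing s with
  | nil => simpa [pvMaxScore]
  | cons c cs ih =>
    simp only [pvMaxScore, List.foldl_cons] at *
    exact ih (max s (pvScore c)) (by have := h c (by simp); omega) (fun c hc => h c (by simp [hc]))

lemma pvLe_maxScore_init (cs : List String) (s : Int) : s ≤ pvMaxScore cs s := by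
  induction cs generalizing s with
  | nil => simp [pvMaxScore]
  | cons c cs ih =>
    simp only [pvMaxScore, List.foldl_cons] at *
    exact le_trans (le_max_left _ _) (ih (max s (pvScore c)))

lemma pvLe_maxScore (cs : List String) (s : Int) (c : String) (hc : c ∈ cs) :
    pvScore c ≤ pvMaxScore cs s := by
  induction cs generalizing s with
  | nil => cases hc
  | cons d cs ih =>
    simp only [pvMaxScore, List.foldl_cons]
    rcases List.mem_cons.mp hc with h | h
    · subst h; exact le_trans (le_max_right _ _) (pvLe_maxScore_init cs _)
    · exact ih _ h

-- filtering out zero-score colors does not change the max (start 0)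
lemma pvMaxScore_filter (cs : List String) :
    pvMaxScore (cs.filter (fun c => pvPriority.contains c)) 0 = pvMaxScore cs 0 := by
  apply le_antisymm
  · exact pvMaxScore_le _ 0 _ (pvLe_maxScore_init cs 0)
      (fun c hc => pvLe_maxScore cs 0 c (List.mem_of_mem_filter hc))
  · apply pvMaxScore_le _ 0 _ (pvLe_maxScore_init _ 0)
    intro c hc
    by_cases h : pvPriority.contains c = true
    · exact pvLe_maxScore _ 0 c (List.mem_filter.mpr ⟨hc, h⟩)
    · have h1 : ¬ 0 < pvScore c := fun hp => h ((pvContains_iff c).mpr hp)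
      have h2 := pvLe_maxScore_init (cs.filter (fun c => pvPriority.contains c)) 0
      have h3 := pvScore_nonneg c
      omega

-- the last element of the sorted candidate list has maximal key
lemma pvSorted_last_max (cs : List String)
    (hysne : PySem.List.sorted cs (fun c => pvPriority.getD c 0) false ≠ []) :
    (PySem.List.sorted cs (fun c => pvPriority.getD c 0) false).getLast hysne ∈ cs ∧
    ∀ c ∈ cs, pvScore c ≤
      pvScore ((PySem.List.sorted cs (fun c => pvPriority.getD c 0) false).getLast hysne) := by
  refine ⟨(PySem.List.mem_sorted _ _ _ _).mp (List.getLast_mem _), fun c hc => ?_⟩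
  have hmem : c ∈ PySem.List.sorted cs (fun c => pvPriority.getD c 0) false :=
    (PySem.List.mem_sorted _ _ _ _).mpr hc
  obtain ⟨p, hp, hpe⟩ := List.mem_iff_getElem.mp hmem
  have hlast := List.getLast_eq_getElem hysne
  have hmono := PySem.List.key_sorted_getElem_mono (xs := cs)
    (key := fun c => pvPriority.getD c 0)
    (p := p) (q := (PySem.List.sorted cs (fun c => pvPriority.getD c 0) false).length - 1)
    (by omega) (by omega)
  rw [hlast, ← hpe]
  exact hmono

lemma pvName_score (c : String) : 0 < pvScore c → pvName (pvScore c) = c :=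
  fun h => (pvScore_pos_name c h).symm

-- ===== VERDICT (by name: the statement is the Claim_ definition above) =====
theorem extract_highest_imd_color_py_spec : Claim_equal_extract_highest_imd_color_py := by
  intro imd_data _
  unfold Spec_extract_highest_imd_color_py extract_highest_imd_color_py extract_highest_imd_color_py_alt
  -- rewrite A's fold as a fold over the normalized colors
  have hmap : imd_data.foldl (fun (st : String × Int) item =>
      let color := pvNormColor item
      let score := pvPriority.getD color 0
      if score > st.2 then (color, score) else st) ("", 0)
      = (imd_data.map pvNormColor).foldl (fun (st : String × Int) c =>
          if pvScore c > st.2 then (c, pvScore c) else st) ("", 0) := by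
    rw [List.foldl_map]
    rfl
  set cs := imd_data.map pvNormColor with hcs
  have h0 : pvName 0 = "" := rfl
  have hA := pvFoldA cs 0 le_rfl
  rw [h0] at hA
  simp only [hmap, hA]
  set cands := cs.filter (fun c => pvPriority.contains c) with hcands
  by_cases hne : cands = []
  · -- no valid color: max score is 0, A returns pvName 0 = ""
    rw [if_pos hne]
    have : pvMaxScore cs 0 = 0 := by
      rw [← pvMaxScore_filter cs, ← hcands, hne]
      simp [pvMaxScore]
    rw [this, h0]
  · rw [if_neg hne]
    have hfilt : ∀ x ∈ cands, pvPriority.contains x = true := by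
      intro x hx
      rw [hcands] at hx
      exact (List.mem_filter.mp hx).2
    have hysne : PySem.List.sorted cands (fun c => pvPriority.getD c 0) false ≠ [] := by
      intro h
      exact hne ((PySem.List.sorted_eq_nil_iff _ _ _).mp h)
    obtain ⟨hmem, hmax⟩ := pvSorted_last_max cands hysne
    have hlastpos : 0 < pvScore ((PySem.List.sorted cands
        (fun c => pvPriority.getD c 0) false).getLast hysne) :=
      (pvContains_iff _).mp (hfilt _ hmem)
    have hM : pvMaxScore cs 0 = pvScore ((PySem.List.sorted cands
        (fun c => pvPriority.getD c 0) false).getLast hysne) := by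
      rw [← pvMaxScore_filter cs, ← hcands]
      exact le_antisymm (pvMaxScore_le _ 0 _ (pvScore_nonneg _) hmax) (pvLe_maxScore _ 0 _ hmem)
    rw [hM, pvName_score _ hlastpos, PySem.List.pyGetD_neg_one _ "" hysne]
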